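-- pv_equiv track=rewrite | github.com/ntoonio/calproxy | cal.py | parseiCal
-- ===== SOURCE A (Python) =====
-- ESCAPES = [["\\\\", "\\"], ["\\;", ";"], ["\\,", ","], ["\\n", "\n"], ["\\N", "\n"]]
--
-- def parseiCal(data):
-- 	events = []
-- 	event = None
--
-- 	lastKey = None
--
-- 	for line in data.split("\n"):
-- 		if line == "":
-- 			continue
-- 		elif event != None and line.startswith(" "):
-- 			value = line.strip()
-- 			for r in ESCAPES:
-- 				value = value.replace(r[0], r[1])
-- 			event[lastKey] += value
-- 			continue
--
-- 		line = line.strip()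
--
-- 		if line == "BEGIN:VEVENT":
-- 			event = {}
-- 		elif line == "END:VEVENT":
-- 			events.append(event)
-- 			event = None
-- 		elif event != None:
-- 			key, value = line.split(":", 1)
--
-- 			assert key != "END"
--
-- 			lastKey = key
--
-- 			for r in ESCAPES:
-- 				value = value.replace(r[0], r[1])
-- 			event[key] = value
--
-- 	return events
-- ===== SOURCE B (Python) =====
-- ESCAPES = [["\\\\", "\\"], ["\\;", ";"], ["\\,", ","], ["\\n", "\n"], ["\\N", "\n"]]
--
-- def _unescape(v):
-- 	for r in ESCAPES:
-- 		v = v.replace(r[0], r[1])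
-- 	return v
--
-- def _tokenize(data):
-- 	# one pass over the raw lines: classify each line and unescape its value segment
-- 	toks = []
-- 	opened = False
-- 	for line in data.split("\n"):
-- 		if line == "":
-- 			continue
-- 		if opened and line.startswith(" "):
-- 			toks.append(("cont", "", _unescape(line.strip())))
-- 			continue
-- 		s = line.strip()
-- 		if s == "BEGIN:VEVENT":
-- 			opened = True
-- 			toks.append(("begin", "", ""))
-- 		elif s == "END:VEVENT":
-- 			opened = False
-- 			toks.append(("end", "", ""))
-- 		elif opened:
-- 			key, value = s.split(":", 1)
-- 			toks.append(("kv", key, _unescape(value)))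
-- 	return toks
--
-- def parseiCal(data):
-- 	# second pass: assemble events from the token stream
-- 	events = []
-- 	event = None
-- 	lastKey = None
-- 	for kind, key, value in _tokenize(data):
-- 		if kind == "begin":
-- 			event = {}
-- 		elif kind == "end":
-- 			events.append(event)
-- 			event = None
-- 		elif kind == "kv":
-- 			lastKey = key
-- 			event[key] = value
-- 		else:
-- 			event[lastKey] += value
-- 	return events
-- ===== Notes on version B (the rewrite author's own statement) =====
-- stated objective: alternative
-- what changed: A's single loop that interleaves line classification, per-segment unescaping and event assembly is split into a tokenizing pass (classify each physical line and unescape its value segment) followed by a separate assembler pass over the token stream.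
-- outside the precondition, e.g. on parseiCal('END:VEVENT'): A returns [None], B returns [None]
import Mathlib
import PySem

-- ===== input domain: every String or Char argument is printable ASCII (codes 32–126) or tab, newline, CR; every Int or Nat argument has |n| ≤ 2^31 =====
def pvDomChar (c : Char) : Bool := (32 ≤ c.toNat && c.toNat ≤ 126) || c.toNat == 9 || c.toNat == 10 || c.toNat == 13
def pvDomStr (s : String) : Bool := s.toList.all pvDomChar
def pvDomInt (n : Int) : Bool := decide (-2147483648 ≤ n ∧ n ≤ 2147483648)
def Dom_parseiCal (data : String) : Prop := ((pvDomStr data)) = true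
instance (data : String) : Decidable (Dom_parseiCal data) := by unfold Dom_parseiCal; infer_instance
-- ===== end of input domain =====

-- B re-decomposes A's single state-machine loop into a tokenizing pass (classify + unescape each
-- physical line) followed by an assembling pass over the token stream; same values, no speed claim.

-- ===== PORT A =====
def pvEscapes : List (String × String) :=
  [("\\\\", "\\"), ("\\;", ";"), ("\\,", ","), ("\\n", "\n"), ("\\N", "\n")]

def pvUnescape (v : String) : String :=
  pvEscapes.foldl (fun v r => PySem.Str.replace v r.1 r.2) v

-- A's loop body after `line = line.strip()` (the BEGIN/END/key:value cascade)
def stepAStrip (events : List (PySem.Dict String String))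
    (event : Option (PySem.Dict String String)) (lastKey : Option String) (s : String) :
    List (PySem.Dict String String) × Option (PySem.Dict String String) × Option String :=
  if s = "BEGIN:VEVENT" then (events, some PySem.Dict.empty, lastKey)
  else if s = "END:VEVENT" then
    match event with
    | some ev => (events ++ [ev], none, lastKey)
    | none => (events, none, lastKey)       -- Python appends None here (outside Pre_)
  else
    match event with
    | some ev =>
      match PySem.Str.splitMax? s ":" 1 with
      | some (k :: v :: _) =>
        -- Python's `assert key != "END"` raises AssertionError when k = "END" (outside Pre_)
        (events, some (ev.insert k (pvUnescape v)), some k)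
      | _ => (events, some ev, lastKey)     -- Python: ValueError on a colon-less line (outside Pre_)
    | none => (events, none, lastKey)

-- A's loop body, one physical line
def stepA :
    List (PySem.Dict String String) × Option (PySem.Dict String String) × Option String → String →
    List (PySem.Dict String String) × Option (PySem.Dict String String) × Option String
  | (events, event, lastKey), line =>
    if line = "" then (events, event, lastKey)
    else
      match event with
      | some ev =>
        if PySem.Str.startswith line " " then
          let value := pvUnescape (PySem.Str.strip line)
          match lastKey with
          | some k =>
            match ev.get? k with
            | some old => (events, some (ev.insert k (old ++ value)), lastKey)
            | none => (events, some ev, lastKey)   -- Python: KeyError (outside Pre_)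
          | none => (events, some ev, lastKey)     -- Python: KeyError (outside Pre_)
        else stepAStrip events (some ev) lastKey (PySem.Str.strip line)
      | none => stepAStrip events none lastKey (PySem.Str.strip line)

def parseiCal (data : String) : List (List (String × String)) :=
  ((((PySem.Str.split? data "\n").getD []).foldl stepA ([], none, none)).1).map (·.items)

-- ===== PORT B =====
-- Source B's tokenizer loop body: tokens are triples (kind, key, value)
def stepTok : Bool × List (String × String × String) → String →
    Bool × List (String × String × String)
  | (opened, toks), line =>
    if line = "" then (opened, toks)
    else if opened && PySem.Str.startswith line " " then
      (opened, toks ++ [("cont", "", pvUnescape (PySem.Str.strip line))])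
    else
      let s := PySem.Str.strip line
      if s = "BEGIN:VEVENT" then (true, toks ++ [("begin", "", "")])
      else if s = "END:VEVENT" then (false, toks ++ [("end", "", "")])
      else if opened then
        match PySem.Str.splitMax? s ":" 1 with
        | some (k :: v :: _) => (opened, toks ++ [("kv", k, pvUnescape v)])
        | _ => (opened, toks)               -- Python: ValueError on a colon-less line (outside Pre_)
      else (opened, toks)

def pvTokenize (data : String) : List (String × String × String) :=
  (((PySem.Str.split? data "\n").getD []).foldl stepTok (false, [])).2

-- Source B's assembler loop body, one token
def stepAsm :
    List (PySem.Dict String String) × Option (PySem.Dict String String) × Option String →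
    String × String × String →
    List (PySem.Dict String String) × Option (PySem.Dict String String) × Option String
  | (events, event, lastKey), (kind, key, value) =>
    if kind = "begin" then (events, some PySem.Dict.empty, lastKey)
    else if kind = "end" then
      match event with
      | some ev => (events ++ [ev], none, lastKey)
      | none => (events, none, lastKey)     -- Python appends None here (outside Pre_)
    else if kind = "kv" then
      match event with
      | some ev => (events, some (ev.insert key value), some key)
      | none => (events, none, lastKey)     -- unreachable: "kv" is only emitted while opened
    else
      match event with
      | some ev =>
        match lastKey with
        | some k =>
          match ev.get? k with
          | some old => (events, some (ev.insert k (old ++ value)), lastKey)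
          | none => (events, some ev, lastKey)   -- Python: KeyError (outside Pre_)
        | none => (events, some ev, lastKey)     -- Python: KeyError (outside Pre_)
      | none => (events, none, lastKey)      -- unreachable: "cont" is only emitted while opened

def parseiCal_alt (data : String) : List (List (String × String)) :=
  (((pvTokenize data).foldl stepAsm ([], none, none)).1).map (·.items)

-- ===== PRECONDITION & SPEC =====
-- Pre_ is the well-formedness grammar of the input lines (a validity check, it computes no output):
-- it excludes exactly the inputs on which Python A raises (KeyError: a continuation line whose
-- lastKey is unset or absent from the open event; ValueError: a colon-less key line inside an event;
-- AssertionError: a key line whose key is "END") and the inputs where A returns a list containing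
-- None (an "END:VEVENT" line with no event open), which is not a value of the declared type.
def pvValidStep : Bool × List String × Option String → String →
    Option (Bool × List String × Option String)
  | (opened, keys, last), line =>
    if line = "" then some (opened, keys, last)
    else if opened && PySem.Str.startswith line " " then
      match last with
      | some k => if k ∈ keys then some (opened, keys, last) else none
      | none => none
    else
      let s := PySem.Str.strip line
      if s = "BEGIN:VEVENT" then some (true, [], last)
      else if s = "END:VEVENT" then (if opened then some (false, [], last) else none)
      else if opened then
        match PySem.Str.splitMax? s ":" 1 with
        | some (k :: _ :: _) => if k = "END" then none else some (true, keys ++ [k], some k)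
        | _ => none
      else some (opened, keys, last)

def Pre_parseiCal (data : String) : Prop :=
  (((PySem.Str.split? data "\n").getD []).foldl
    (fun st line => st.bind (fun s => pvValidStep s line)) (some (false, [], none))).isSome = true
instance (data : String) : Decidable (Pre_parseiCal data) := by unfold Pre_parseiCal; infer_instance

def pvWitness_parseiCal : String :=
  "BEGIN:VEVENT\nSUMMARY:a\\nb\n more\\,x\nEND:VEVENT"

def Spec_parseiCal (data : String) (out : List (List (String × String))) : Prop := out = parseiCal_alt data
instance (data : String) (out : List (List (String × String))) : Decidable (Spec_parseiCal data out) := by unfold Spec_parseiCal; infer_instance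

-- ===== CLAIM (what is proved, stated in full; the proofs are below) =====
def Claim_equal_parseiCal : Prop := ∀ (data : String), Dom_parseiCal data → Pre_parseiCal data → Spec_parseiCal data (parseiCal data)

-- ===== LEMMAS AND PROOFS =====

-- one tokenizer step appends its (at most one) token to the accumulator
theorem stepTok_acc (o : Bool) (acc : List (String × String × String)) (line : String) :
    stepTok (o, acc) line = ((stepTok (o, []) line).1, acc ++ (stepTok (o, []) line).2) := by
  simp only [stepTok]
  split_ifs <;> try simp
  rcases PySem.Str.splitMax? (PySem.Str.strip line) ":" 1 with _ | (_ | ⟨k, _ | ⟨v, t⟩⟩) <;> simp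

theorem foldTok_acc (lines : List String) (o : Bool) (acc : List (String × String × String)) :
    lines.foldl stepTok (o, acc)
      = ((lines.foldl stepTok (o, [])).1, acc ++ (lines.foldl stepTok (o, [])).2) := by
  induction lines generalizing o acc with
  | nil => simp
  | cons l ls ih =>
    simp only [List.foldl_cons]
    rw [stepTok_acc o acc l, stepTok_acc o [] l]
    simp only [List.nil_append]
    rw [ih, ih ((stepTok (o, []) l).1) ((stepTok (o, []) l).2)]
    simp

-- simulating one physical line: assembling the token(s) the tokenizer emits for the line,
-- starting from an A-state whose open flag matches, equals A's step; and the flags stay matched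
theorem step_sim (events : List (PySem.Dict String String))
    (event : Option (PySem.Dict String String)) (lastKey : Option String) (line : String) :
    (stepTok (event.isSome, []) line).2.foldl stepAsm (events, event, lastKey)
        = stepA (events, event, lastKey) line
      ∧ (stepTok (event.isSome, []) line).1 = (stepA (events, event, lastKey) line).2.1.isSome := by
  by_cases h0 : line = ""
  · rcases event with _ | ev <;> simp [stepTok, stepA, h0]
  · rcases event with _ | ev
    · by_cases h1 : PySem.Str.strip line = "BEGIN:VEVENT" <;>
        by_cases h2 : PySem.Str.strip line = "END:VEVENT" <;>
        simp [stepTok, stepA, stepAStrip, stepAsm, h0, h1, h2]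
    · by_cases hsp : PySem.Chars.startswith line.toList [' '] = true
      · rcases lastKey with _ | k
        · simp [stepTok, stepA, stepAsm, h0, hsp]
        · rcases hg : ev.get? k with _ | old <;>
            simp [stepTok, stepA, stepAsm, h0, hsp, hg]
      · by_cases h1 : PySem.Str.strip line = "BEGIN:VEVENT" <;>
          by_cases h2 : PySem.Str.strip line = "END:VEVENT"
        · simp_all
        · simp [stepTok, stepA, stepAStrip, stepAsm, h0, hsp, h1]
        · simp [stepTok, stepA, stepAStrip, stepAsm, h0, hsp, h2]
        · rcases hm : PySem.Str.splitMax? (PySem.Str.strip line) ":" 1 with _ | (_ | ⟨k, _ | ⟨v, t⟩⟩) <;>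
            simp [stepTok, stepA, stepAStrip, stepAsm, h0, hsp, h1, h2, hm]

theorem main_sim (lines : List String) (events : List (PySem.Dict String String))
    (event : Option (PySem.Dict String String)) (lastKey : Option String) :
    ((lines.foldl stepTok (event.isSome, [])).2).foldl stepAsm (events, event, lastKey)
      = lines.foldl stepA (events, event, lastKey) := by
  induction lines generalizing events event lastKey with
  | nil => simp
  | cons l ls ih =>
    simp only [List.foldl_cons]
    rw [stepTok_acc _ _ l, foldTok_acc ls]
    simp only [List.foldl_append, List.foldl_nil]
    obtain ⟨h1, h2⟩ := step_sim events event lastKey l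
    rcases hst : stepA (events, event, lastKey) l with ⟨es', ev', lk'⟩
    rw [hst] at h1 h2
    rw [h1, h2]
    exact ih es' ev' lk'

-- ===== VERDICT (by name: the statement is the Claim_ definition above) =====
theorem parseiCal_spec : Claim_equal_parseiCal := by
  intro data _ _
  unfold Spec_parseiCal parseiCal parseiCal_alt pvTokenize
  rw [show (false : Bool) = (none : Option (PySem.Dict String String)).isSome from rfl, main_sim]
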